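-- pv_equiv track=rewrite | github.com/Portabello/leetcode_2024 | 2609.find_the_longest_balanced_substring_of_a_binary_string.py | isValidBalancedSubstring
-- ===== SOURCE A (Python) =====
-- def isValidBalancedSubstring(s):
--     if len(s)%2!=0:
--         return False
--     zero_count = 0
--     one_count = 0
--     flag = False
--     for c in s:
--         if c=='0':
--             if flag:
--                 return False
--             zero_count +=1
--         if c=='1':
--             flag = True
--             one_count += 1
--     if zero_count != one_count:
--         return False
--     return True
-- ===== SOURCE B (Python) =====
-- def isValidBalancedSubstring(s):
--     if len(s) % 2 != 0:
--         return False
--     if s.count('0') != s.count('1'):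
--         return False
--     f1 = s.find('1')
--     return f1 == -1 or '0' not in s[f1:]
-- ===== Notes on version B (the rewrite author's own statement) =====
-- stated objective: simpler
-- what changed: Replaced the stateful flag/counter scan with aggregate queries: length parity, equality of the zero-count and the one-count, and a positional check via find plus a slice membership test that no zero character occurs after the first one character.
import Mathlib
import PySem

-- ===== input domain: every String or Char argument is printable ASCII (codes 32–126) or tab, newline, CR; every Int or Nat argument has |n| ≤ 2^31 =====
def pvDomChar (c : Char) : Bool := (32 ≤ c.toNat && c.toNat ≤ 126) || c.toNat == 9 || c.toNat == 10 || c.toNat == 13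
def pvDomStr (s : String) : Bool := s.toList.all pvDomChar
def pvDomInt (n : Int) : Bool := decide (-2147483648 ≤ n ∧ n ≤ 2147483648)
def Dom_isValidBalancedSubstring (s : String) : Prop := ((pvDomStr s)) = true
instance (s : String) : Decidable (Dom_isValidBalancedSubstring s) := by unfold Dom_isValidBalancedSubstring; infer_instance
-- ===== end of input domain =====

-- B replaces A's stateful flag/counter scan by aggregate queries (length parity,
-- counts of '0' and '1', and find('1') + slice membership); proved to return the same Bool.

-- ===== PORT A =====
-- the for-loop of A: early return False on a '0' after the flag is set; final count check
def pvLoopA : List Char → Int → Int → Bool → Bool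
  | [], zero_count, one_count, _ => !(zero_count != one_count)
  | c :: rest, zero_count, one_count, flag =>
    if c == '0' then
      if flag then false
      else pvLoopA rest (zero_count + 1) one_count flag
    else if c == '1' then
      pvLoopA rest zero_count (one_count + 1) true
    else
      pvLoopA rest zero_count one_count flag

def isValidBalancedSubstring (s : String) : Bool :=
  if PySem.Int.mod (PySem.Str.len s) 2 != 0 then false
  else pvLoopA s.toList 0 0 false

-- ===== PORT B =====
def isValidBalancedSubstring_alt (s : String) : Bool :=
  if PySem.Int.mod (PySem.Str.len s) 2 != 0 then false
  else if PySem.Str.count s "0" != PySem.Str.count s "1" then false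
  else
    let f1 := PySem.Str.find s "1"
    (f1 == -1) || !(PySem.Str.isIn "0" (PySem.Str.slice s (some f1) none))

-- ===== PRECONDITION & SPEC =====
def Spec_isValidBalancedSubstring (s : String) (out : Bool) : Prop := out = isValidBalancedSubstring_alt s
instance (s : String) (out : Bool) : Decidable (Spec_isValidBalancedSubstring s out) := by unfold Spec_isValidBalancedSubstring; infer_instance

-- ===== CLAIM (what is proved, stated in full; the proofs are below) =====
def Claim_equal_isValidBalancedSubstring : Prop := ∀ (s : String), Dom_isValidBalancedSubstring s → Spec_isValidBalancedSubstring s (isValidBalancedSubstring s)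

-- ===== LEMMAS AND PROOFS =====

-- helper (proof-side): the "a '0' occurs after a '1'" predicate of A's early return
def pvBad : List Char → Bool
  | [] => false
  | c :: r => (c == '1' && r.contains '0') || pvBad r

lemma pvLoopA_eq (cs : List Char) : ∀ (zc oc : Int) (flag : Bool),
    pvLoopA cs zc oc flag =
      if (flag && cs.contains '0') || pvBad cs then false
      else decide (zc + (cs.count '0' : Int) = oc + (cs.count '1' : Int)) := by
  induction cs with
  | nil =>
    intro zc oc flag
    simp only [pvLoopA, pvBad, List.contains_nil, Bool.and_false, Bool.or_false,
      Bool.false_eq_true, if_false, List.count_nil, Nat.cast_zero, add_zero, bne]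
    cases h : zc == oc <;> simp_all
  | cons c r ih =>
    intro zc oc flag
    by_cases h0 : c = '0'
    · subst h0
      cases flag with
      | true => simp [pvLoopA, pvBad]
      | false =>
        simp only [pvLoopA, pvBad, ih, List.count_cons, List.contains_cons]
        rcases pvBad r
        · simp
          omega
        · simp
    · by_cases h1 : c = '1'
      · subst h1
        simp only [pvLoopA, pvBad, ih, List.count_cons, List.contains_cons]
        have hc : (('0' : Char) == '1') = false := by decide
        rcases hb : (r.contains '0' || pvBad r) with _ | _ <;>
          cases flag <;>
            simp_all <;> · omega
      · simp only [pvLoopA, pvBad, ih, List.count_cons, List.contains_cons]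
        have hb0 : (c == '1') = false := by simp [h1]
        have hb1 : (('0' : Char) == c) = false := by simp [Ne.symm h0]
        have hb2 : (('1' : Char) == c) = false := by simp [Ne.symm h1]
        simp [hb0, hb1, h0]

lemma pv_count_go_singleton (c : Char) : ∀ (l : List Char) (fuel acc : Nat),
    l.length ≤ fuel → PySem.Chars.count.go [c] fuel l acc = acc + l.count c := by
  intro l
  induction l with
  | nil => intro fuel acc _; cases fuel <;> simp [PySem.Chars.count.go]
  | cons h t ih =>
    intro fuel acc hf
    cases fuel with
    | zero => simp at hf
    | succ n =>
      have hlen : t.length ≤ n := by simpa using hf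
      by_cases hc : h = c
      · subst hc
        rw [show PySem.Chars.count.go [h] (n+1) (h :: t) acc
              = PySem.Chars.count.go [h] n t (acc + 1) by
            simp [PySem.Chars.count.go, List.isPrefixOf]]
        rw [ih n (acc + 1) hlen]
        simp
        omega
      · rw [show PySem.Chars.count.go [c] (n+1) (h :: t) acc
              = PySem.Chars.count.go [c] n t acc by
            simp [PySem.Chars.count.go, List.isPrefixOf, Ne.symm hc]]
        rw [ih n acc hlen]
        simp [hc]

lemma pv_count_singleton (cs : List Char) (c : Char) :
    PySem.Chars.count cs [c] = cs.count c := by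
  simp [PySem.Chars.count, pv_count_go_singleton c cs cs.length 0 le_rfl]

lemma pv_singleton_infix {a : Char} {l : List Char} : [a] <:+: l ↔ a ∈ l := by
  constructor
  · rintro ⟨s, t, rfl⟩; simp
  · intro h
    obtain ⟨s, t, rfl⟩ := List.append_of_mem h
    exact ⟨s, t, by simp⟩

lemma pvBad_iff (cs : List Char) :
    pvBad cs = true ↔ ∃ l₁ l₂, cs = l₁ ++ '1' :: l₂ ∧ '0' ∈ l₂ := by
  induction cs with
  | nil => simp [pvBad]
  | cons c r ih =>
    simp only [pvBad, Bool.or_eq_true, Bool.and_eq_true, beq_iff_eq, ih]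
    constructor
    · rintro (⟨rfl, hm⟩ | ⟨l₁, l₂, rfl, hm⟩)
      · exact ⟨[], r, rfl, by simpa using hm⟩
      · exact ⟨c :: l₁, l₂, rfl, hm⟩
    · rintro ⟨l₁, l₂, he, hm⟩
      cases l₁ with
      | nil =>
        simp at he
        exact Or.inl ⟨he.1, by simp [he.2, hm]⟩
      | cons x l₁' =>
        simp at he
        exact Or.inr ⟨l₁', l₂, he.2, hm⟩

lemma pvBad_iff_drop (cs : List Char) (n : Nat)
    (hpre : ['1'] <+: cs.drop n)
    (hmin : ∀ i < n, ¬ ['1'] <+: cs.drop i) :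
    (pvBad cs = true ↔ '0' ∈ cs.drop n) := by
  rw [pvBad_iff]
  constructor
  · rintro ⟨l₁, l₂, rfl, hm⟩
    have hd : (l₁ ++ '1' :: l₂).drop l₁.length = '1' :: l₂ := by
      simp
    have hn : n ≤ l₁.length := by
      by_contra hlt
      exact hmin l₁.length (by omega) (by rw [hd]; exact ⟨l₂, rfl⟩)
    have : (l₁ ++ '1' :: l₂).drop l₁.length =
        ((l₁ ++ '1' :: l₂).drop n).drop (l₁.length - n) := by
      rw [List.drop_drop]; congr 1; omega
    have h0 : '0' ∈ ((l₁ ++ '1' :: l₂).drop n).drop (l₁.length - n) := by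
      rw [← this, hd]; simp [hm]
    exact List.mem_of_mem_drop h0
  · intro hm
    obtain ⟨t, ht⟩ := hpre
    have hd : cs.drop n = '1' :: t := by rw [← ht]; rfl
    have hcs : cs = cs.take n ++ '1' :: t := by
      conv_lhs => rw [← List.take_append_drop n cs, hd]
    have hm' : '0' ∈ '1' :: t := by rw [← hd]; exact hm
    have h0t : '0' ∈ t := by
      rcases List.mem_cons.mp hm' with h | h
      · exact absurd h (by decide)
      · exact h
    exact ⟨cs.take n, t, hcs, h0t⟩

lemma pv_rhs_eq_not_bad (cs : List Char) :
    ((PySem.Chars.find cs ['1'] == -1) ||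
      !PySem.Chars.isIn ['0'] (PySem.List.slice cs (some (PySem.Chars.find cs ['1'])) none))
    = !pvBad cs := by
  by_cases hmem : '1' ∈ cs
  · have hinf : ['1'] <:+: cs := pv_singleton_infix.mpr hmem
    have hF : 0 ≤ PySem.Chars.find cs ['1'] := (PySem.Chars.find_nonneg_iff _ _).mpr hinf
    have hFne : (PySem.Chars.find cs ['1'] == -1) = false := by
      simp only [beq_eq_false_iff_ne, ne_eq]
      intro h; rw [h] at hF; omega
    obtain ⟨hpre, hmin⟩ := PySem.Chars.find_spec (s := cs) (sub := ['1']) hF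
    have hFle : PySem.Chars.find cs ['1'] ≤ cs.length := PySem.Chars.find_le_length cs ['1']
    have hslice : PySem.List.slice cs (some (PySem.Chars.find cs ['1'])) none
        = cs.drop (PySem.Chars.find cs ['1']).toNat := by
      rw [PySem.List.slice_some_none]
      congr 1
      rw [show PySem.Chars.find cs ['1'] = ((PySem.Chars.find cs ['1']).toNat : Int) from
            (Int.toNat_of_nonneg hF).symm, PySem.List.clampIdx_natCast]
      omega
    have hbad := pvBad_iff_drop cs (PySem.Chars.find cs ['1']).toNat hpre hmin
    rw [hFne, hslice]
    cases hb : pvBad cs with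
    | true =>
      have h0 : '0' ∈ cs.drop (PySem.Chars.find cs ['1']).toNat := hbad.mp hb
      have : PySem.Chars.isIn ['0'] (cs.drop (PySem.Chars.find cs ['1']).toNat) = true :=
        (PySem.Chars.isIn_iff_infix _ _).mpr (pv_singleton_infix.mpr h0)
      simp [this]
    | false =>
      have h0 : '0' ∉ cs.drop (PySem.Chars.find cs ['1']).toNat := by
        intro h; rw [hbad.mpr h] at hb; exact Bool.true_eq_false.mp hb
      have : PySem.Chars.isIn ['0'] (cs.drop (PySem.Chars.find cs ['1']).toNat) = false := by
        rw [PySem.Chars.isIn_eq_false_iff _ _]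
        intro h; exact h0 (pv_singleton_infix.mp h)
      simp [this]
  · have hF : PySem.Chars.find cs ['1'] = -1 :=
      (PySem.Chars.find_eq_neg_one_iff _ _).mpr (fun h => hmem (pv_singleton_infix.mp h))
    have hb : pvBad cs = false := by
      cases hbv : pvBad cs with
      | false => rfl
      | true =>
        obtain ⟨l₁, l₂, rfl, _⟩ := (pvBad_iff _).mp hbv
        exact absurd (by simp : '1' ∈ l₁ ++ '1' :: l₂) hmem
    simp [hF, hb]

-- ===== VERDICT (by name: the statement is the Claim_ definition above) =====
theorem isValidBalancedSubstring_spec : Claim_equal_isValidBalancedSubstring := by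
  intro s _
  unfold Spec_isValidBalancedSubstring isValidBalancedSubstring isValidBalancedSubstring_alt
  by_cases hpar : (PySem.Int.mod (PySem.Str.len s) 2 != 0) = true
  · rw [if_pos hpar, if_pos hpar]
  · rw [if_neg hpar, if_neg hpar]
    have hc0 : PySem.Str.count s "0" = s.toList.count '0' := by
      have h : ("0" : String).toList = ['0'] := rfl
      rw [PySem.Str.count_eq, h, pv_count_singleton]
    have hc1 : PySem.Str.count s "1" = s.toList.count '1' := by
      have h : ("1" : String).toList = ['1'] := rfl
      rw [PySem.Str.count_eq, h, pv_count_singleton]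
    by_cases hcnt : s.toList.count '0' = s.toList.count '1'
    · rw [if_neg (by simp [pv_count_singleton, hcnt])]
      have hA : pvLoopA s.toList 0 0 false = !pvBad s.toList := by
        rw [pvLoopA_eq]
        cases hb : pvBad s.toList <;> simp [hcnt]
      rw [hA]
      have hfind : PySem.Str.find s "1" = PySem.Chars.find s.toList ['1'] := by
        have h : ("1" : String).toList = ['1'] := rfl
        rw [PySem.Str.find_eq, h]
      have hisin : PySem.Str.isIn "0" (PySem.Str.slice s (some (PySem.Str.find s "1")) none)
          = PySem.Chars.isIn ['0']
              (PySem.List.slice s.toList (some (PySem.Chars.find s.toList ['1'])) none) := by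
        have h : ("0" : String).toList = ['0'] := rfl
        rw [PySem.Str.isIn_eq, h, PySem.Str.toList_slice, PySem.Chars.slice_eq_listSlice, hfind]
      show (!pvBad s.toList) = ((PySem.Chars.find s.toList ['1'] == -1) ||
        !PySem.Str.isIn "0" (PySem.Str.slice s (some (PySem.Chars.find s.toList ['1'])) none))
      rw [← hfind, hisin, hfind, pv_rhs_eq_not_bad]
    · rw [if_pos (by simp [pv_count_singleton, hcnt])]
      rw [pvLoopA_eq]
      cases hb : pvBad s.toList <;> simp [hcnt]
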